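-- pv_equiv track=rewrite | github.com/anzenaoto/MINI-GAME | Threes.py | NewNumber
-- ===== SOURCE A (Python) =====
-- def NewNumber(x,d,k,tt):
--     m = 0
--     Z = -1
--     if tt == 'D':
--         for i in range(len(x)):
--              if x[0][i] == 0:
--                  m +=1
--         for j in range(len(x)):
--                 if x[0][j] == 0:
--                     Z += 1
--                     if Z == k%m:
--                         x[0][j] = d
--                         return x
--     elif tt == 'U':
--         for i in range(len(x)):
--              if x[len(x)-1][i] == 0:
--                  m +=1
--         for j in range(len(x)):
--             if x[len(x)-1][j] == 0:
--                 Z += 1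
--                 if Z == k%m:
--                     x[len(x)-1][j] = d
--                     return x
--     elif tt == 'R':
--         for i in range(len(x)):
--             if x[i][0] == 0:
--                 m += 1
--         for j in range(len(x)):
--             if x[j][0] == 0:
--                 Z += 1
--                 if Z == k%m:
--                     x[j][0] = d
--                     return x
--     elif tt == 'L':
--         for i in range(len(x)):
--             if x[i][len(x)-1] == 0:
--                 m += 1
--         for j in range(len(x)):
--             if x[j][len(x)-1] == 0:
--                 Z += 1
--                 if Z == k%m:
--                     x[j][len(x)-1] = d
--                     return(x)
--     return x
-- ===== SOURCE B (Python) =====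
-- # B: extract the relevant edge as a 1-D line, recursively rebuild it with the
-- # (k % m)-th zero replaced by d, and write the line back; A instead runs two
-- # index-counting loops with an early return on the 2-D grid.  Mutates x in
-- # place like A (writes back the whole edge line, value-identical cells).
-- def _place(vals, d, t):
--     if not vals:
--         return []
--     v = vals[0]
--     if v == 0:
--         if t == 0:
--             return [d] + vals[1:]
--         return [v] + _place(vals[1:], d, t - 1)
--     return [v] + _place(vals[1:], d, t)
--
-- def NewNumber(x, d, k, tt):
--     if not x:
--         return x
--     n = len(x)
--     if tt == 'D':
--         line = x[0][:n]
--         m = line.count(0)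
--         if m:
--             x[0][:n] = _place(line, d, k % m)
--     elif tt == 'U':
--         line = x[n - 1][:n]
--         m = line.count(0)
--         if m:
--             x[n - 1][:n] = _place(line, d, k % m)
--     elif tt == 'R':
--         col = [r[0] for r in x]
--         m = col.count(0)
--         if m:
--             for r, v in zip(x, _place(col, d, k % m)):
--                 r[0] = v
--     elif tt == 'L':
--         col = [r[n - 1] for r in x]
--         m = col.count(0)
--         if m:
--             for r, v in zip(x, _place(col, d, k % m)):
--                 r[n - 1] = v
--     return x
-- ===== Notes on version B (the rewrite author's own statement) =====
-- stated objective: alternative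
-- what changed: B extracts the relevant edge as a 1-D list, recursively rebuilds that line with the (k mod m)-th zero replaced by d, and writes the whole line back, instead of A's four copies of two index-counting loops with an early return on the 2-D grid.
import Mathlib
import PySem

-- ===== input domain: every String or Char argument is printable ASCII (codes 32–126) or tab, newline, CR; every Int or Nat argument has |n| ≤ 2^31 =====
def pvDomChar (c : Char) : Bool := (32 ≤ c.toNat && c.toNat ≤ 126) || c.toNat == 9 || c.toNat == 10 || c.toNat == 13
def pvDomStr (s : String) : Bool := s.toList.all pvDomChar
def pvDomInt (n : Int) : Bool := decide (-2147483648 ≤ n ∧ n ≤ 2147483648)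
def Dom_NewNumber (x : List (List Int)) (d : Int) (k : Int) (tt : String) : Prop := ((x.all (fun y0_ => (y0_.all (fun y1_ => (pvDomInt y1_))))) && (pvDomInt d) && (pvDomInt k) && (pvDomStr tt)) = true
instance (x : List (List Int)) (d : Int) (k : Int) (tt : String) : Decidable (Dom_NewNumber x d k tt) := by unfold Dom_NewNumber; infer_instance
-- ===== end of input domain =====

-- B rebuilds the chosen edge as an extracted 1-D line (recursively replacing the
-- (k mod m)-th zero) instead of A's two index-counting loops on the 2-D grid.
-- Both Pythons mutate x in place and return it; the mutated cells are identical
-- in value, and the equivalence proved is about the RETURN value.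

-- ===== PORT A =====
-- A's first loop: count the zeros on the edge (m).
def pvCountZeros (get : Nat → Int) (js : List Nat) : Int :=
  js.foldl (fun m i => if get i == 0 then m + 1 else m) 0

-- A's second loop: counter Z starts at -1; at each zero increment Z and, if
-- Z == tgt, return that position (early return); otherwise fall through (none).
def pvPlaceLoop (get : Nat → Int) (tgt : Int) : List Nat → Int → Option Nat
  | [], _ => none
  | j :: js, Z =>
      if get j == 0 then
        if Z + 1 == tgt then some j else pvPlaceLoop get tgt js (Z + 1)
      else pvPlaceLoop get tgt js Z

def NewNumber (x : List (List Int)) (d : Int) (k : Int) (tt : String) : List (List Int) :=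
  let n := x.length
  if tt == "D" then
    let m := pvCountZeros (fun i => (x.getD 0 []).getD i 0) (List.range n)
    match pvPlaceLoop (fun i => (x.getD 0 []).getD i 0) (PySem.Int.mod k m) (List.range n) (-1) with
    | some j => x.set 0 ((x.getD 0 []).set j d)
    | none => x
  else if tt == "U" then
    let m := pvCountZeros (fun i => (x.getD (n - 1) []).getD i 0) (List.range n)
    match pvPlaceLoop (fun i => (x.getD (n - 1) []).getD i 0) (PySem.Int.mod k m) (List.range n) (-1) with
    | some j => x.set (n - 1) ((x.getD (n - 1) []).set j d)
    | none => x
  else if tt == "R" then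
    let m := pvCountZeros (fun i => (x.getD i []).getD 0 0) (List.range n)
    match pvPlaceLoop (fun i => (x.getD i []).getD 0 0) (PySem.Int.mod k m) (List.range n) (-1) with
    | some j => x.set j ((x.getD j []).set 0 d)
    | none => x
  else if tt == "L" then
    let m := pvCountZeros (fun i => (x.getD i []).getD (n - 1) 0) (List.range n)
    match pvPlaceLoop (fun i => (x.getD i []).getD (n - 1) 0) (PySem.Int.mod k m) (List.range n) (-1) with
    | some j => x.set j ((x.getD j []).set (n - 1) d)
    | none => x
  else x

-- ===== PORT B =====
-- Source B's _place: recursively rebuild the line, replacing its t-th zero by d.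
def pvPlaceLine (d : Int) : List Int → Int → List Int
  | [], _ => []
  | v :: rest, t =>
      if v == 0 then
        if t == 0 then d :: rest else v :: pvPlaceLine d rest (t - 1)
      else v :: pvPlaceLine d rest t

def NewNumber_alt (x : List (List Int)) (d : Int) (k : Int) (tt : String) : List (List Int) :=
  if x.isEmpty then x
  else
    let n := x.length
    if tt == "D" then
      let line := (x.getD 0 []).take n
      let m := line.count 0
      if m == 0 then x
      else x.set 0 (pvPlaceLine d line (PySem.Int.mod k (m : Int)) ++ (x.getD 0 []).drop n)
    else if tt == "U" then
      let line := (x.getD (n - 1) []).take n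
      let m := line.count 0
      if m == 0 then x
      else x.set (n - 1) (pvPlaceLine d line (PySem.Int.mod k (m : Int)) ++ (x.getD (n - 1) []).drop n)
    else if tt == "R" then
      let col := x.map (fun r => r.getD 0 0)
      let m := col.count 0
      if m == 0 then x
      else List.zipWith (fun r v => r.set 0 v) x (pvPlaceLine d col (PySem.Int.mod k (m : Int)))
    else if tt == "L" then
      let col := x.map (fun r => r.getD (n - 1) 0)
      let m := col.count 0
      if m == 0 then x
      else List.zipWith (fun r v => r.set (n - 1) v) x (pvPlaceLine d col (PySem.Int.mod k (m : Int)))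
    else x

-- ===== PRECONDITION & SPEC =====
-- Pre_ excludes exactly the inputs where Python A raises IndexError: a matched
-- direction whose scan reads an index ≥ the length of some accessed row.
def Pre_NewNumber (x : List (List Int)) (d : Int) (k : Int) (tt : String) : Prop :=
  (tt = "D" → x.length ≤ (x.getD 0 []).length) ∧
  (tt = "U" → x.length ≤ (x.getD (x.length - 1) []).length) ∧
  (tt = "R" → ∀ row ∈ x, 1 ≤ row.length) ∧
  (tt = "L" → ∀ row ∈ x, x.length ≤ row.length)
instance (x : List (List Int)) (d : Int) (k : Int) (tt : String) : Decidable (Pre_NewNumber x d k tt) := by unfold Pre_NewNumber; infer_instance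
def pvWitness_NewNumber : List (List Int) × Int × Int × String := ([[0, 0], [1, 2]], 3, 1, "D")

def Spec_NewNumber (x : List (List Int)) (d : Int) (k : Int) (tt : String) (out : List (List Int)) : Prop := out = NewNumber_alt x d k tt
instance (x : List (List Int)) (d : Int) (k : Int) (tt : String) (out : List (List Int)) : Decidable (Spec_NewNumber x d k tt out) := by unfold Spec_NewNumber; infer_instance

-- ===== CLAIM (what is proved, stated in full; the proofs are below) =====
def Claim_equal_NewNumber : Prop := ∀ (x : List (List Int)) (d : Int) (k : Int) (tt : String), Dom_NewNumber x d k tt → Pre_NewNumber x d k tt → Spec_NewNumber x d k tt (NewNumber x d k tt)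

-- ===== LEMMAS AND PROOFS =====

-- the positions of the zeros of a line
def pvZs (vals : List Int) : List Nat :=
  (List.range vals.length).filter (fun i => vals.getD i 0 == 0)

theorem pvZs_cons (v : Int) (rest : List Int) :
    pvZs (v :: rest) = (if v == 0 then [0] else []) ++ (pvZs rest).map Nat.succ := by
  unfold pvZs
  rw [List.length_cons, List.range_succ_eq_map, List.filter_cons, List.filter_map]
  by_cases hv : v == 0 <;> simp [hv, Function.comp_def]

theorem pvZs_count (vals : List Int) : vals.count 0 = (pvZs vals).length := by
  induction vals with
  | nil => simp [pvZs]
  | cons v rest ih =>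
      rw [pvZs_cons, List.count_cons]
      by_cases hv : v == 0 <;> simp [hv, ih]

theorem pvZs_mem_lt (vals : List Int) : ∀ j ∈ pvZs vals, j < vals.length := by
  intro j hj
  have := List.mem_of_mem_filter hj
  simpa using this

-- A's counting loop computes the length of the filtered position list.
theorem pvCountZeros_eq (get : Nat → Int) (js : List Nat) :
    pvCountZeros get js = ((js.filter (fun j => get j == 0)).length : Int) := by
  suffices h : ∀ (m : Int), js.foldl (fun m i => if get i == 0 then m + 1 else m) m
      = m + ((js.filter (fun j => get j == 0)).length : Int) by
    simpa [pvCountZeros] using h 0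
  induction js with
  | nil => intro m; simp
  | cons j js ih =>
      intro m
      rw [List.foldl_cons, List.filter_cons]
      by_cases h : get j == 0
      · rw [if_pos h, if_pos h, ih]; simp only [List.length_cons]; push_cast; ring
      · rw [if_neg h, if_neg h, ih]

-- A's counter loop returns (as an option) the entry of the filtered list at
-- index tgt - (Z+1), provided Z < tgt; out-of-range or Z ≥ tgt gives none.
theorem pvPlaceLoop_eq (get : Nat → Int) (tgt : Int) (js : List Nat) (Z : Int) :
    pvPlaceLoop get tgt js Z =
      if Z < tgt then (js.filter (fun j => get j == 0))[(tgt - Z - 1).toNat]? else none := by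
  induction js generalizing Z with
  | nil => simp [pvPlaceLoop]
  | cons j js ih =>
      by_cases hz : get j == 0
      · by_cases he : Z + 1 = tgt
        · have : (tgt - Z - 1).toNat = 0 := by omega
          simp [pvPlaceLoop, hz, he, List.filter, this]
          omega
        · have hne : (Z + 1 == tgt) = false := by simp [he]
          rw [show pvPlaceLoop get tgt (j :: js) Z = pvPlaceLoop get tgt js (Z + 1) by
            simp [pvPlaceLoop, hz, hne]]
          rw [ih (Z + 1)]
          by_cases hlt : Z + 1 < tgt
          · have hlt' : Z < tgt := by omega
            have hpos : (tgt - Z - 1).toNat = (tgt - (Z + 1) - 1).toNat + 1 := by omega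
            simp [hlt, hlt', List.filter, hz, hpos]
          · by_cases hlt2 : Z < tgt
            · have : tgt = Z + 1 := by omega
              exact absurd this.symm he
            · simp [hlt, hlt2]
      · simp only [pvPlaceLoop, hz, if_false, Bool.false_eq_true]
        rw [ih Z]
        simp [List.filter, hz]

-- B's recursive line rebuild equals a single set at the t-th zero position.
theorem pvPlaceLine_eq_set (d : Int) (vals : List Int) (t : Int) (ht : 0 ≤ t)
    (hlt : t.toNat < (pvZs vals).length) :
    pvPlaceLine d vals t = vals.set ((pvZs vals).getD t.toNat 0) d := by
  induction vals generalizing t with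
  | nil => simp [pvZs] at hlt
  | cons v rest ih =>
      rw [pvZs_cons] at hlt ⊢
      by_cases hv : v == 0
      · by_cases ht0 : t = 0
        · subst ht0
          simp [pvPlaceLine, hv]
        · have ht1 : 1 ≤ t := by omega
          have htoNat : t.toNat = (t - 1).toNat + 1 := by omega
          simp only [hv, if_true, List.singleton_append, List.length_cons] at hlt
          have hlt' : (t - 1).toNat < (pvZs rest).length := by
            rw [List.length_map] at hlt; omega
          have hne : (t == 0) = false := by simp [ht0]
          rw [show pvPlaceLine d (v :: rest) t = v :: pvPlaceLine d rest (t - 1) by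
            simp [pvPlaceLine, hv, hne]]
          rw [ih (t - 1) (by omega) hlt']
          simp only [hv, if_true, List.singleton_append, htoNat, List.getD_cons_succ]
          rw [List.getD_eq_getElem (List.map Nat.succ (pvZs rest)) 0 (by simpa using hlt'),
            List.getElem_map, ← List.getD_eq_getElem (pvZs rest) 0 hlt']
          simp [Nat.succ_eq_add_one, List.set_cons_succ]
      · simp only [hv, Bool.false_eq_true, if_false, List.nil_append] at hlt ⊢
        have hlt' : t.toNat < (pvZs rest).length := by rw [List.length_map] at hlt; omega
        rw [show pvPlaceLine d (v :: rest) t = v :: pvPlaceLine d rest t by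
          simp [pvPlaceLine, hv]]
        rw [ih t ht hlt']
        rw [List.getD_eq_getElem (List.map Nat.succ (pvZs rest)) 0 (by simpa using hlt'),
          List.getElem_map, ← List.getD_eq_getElem (pvZs rest) 0 hlt']
        simp [Nat.succ_eq_add_one, List.set_cons_succ]

-- the filter A's loops use equals pvZs of the extracted line
theorem pvFilter_congr (n : Nat) (get : Nat → Int) (vals : List Int)
    (hlen : vals.length = n) (h : ∀ i < n, get i = vals.getD i 0) :
    (List.range n).filter (fun i => get i == 0) = pvZs vals := by
  unfold pvZs
  rw [hlen]
  exact List.filter_congr (by intro i hi; rw [h i (List.mem_range.mp hi)])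

-- writing the rebuilt row line back over x0 is a single set in x0
theorem pvRow_set (x0 : List Int) (d : Int) (n j : Nat) (hj : j < n) :
    (x0.take n).set j d ++ x0.drop n = x0.set j d := by
  conv_rhs => rw [← List.take_append_drop n (x0.set j d)]
  rw [List.take_set, List.drop_set_of_lt hj]

-- writing a column's own values back leaves the grid unchanged
theorem pvZip_id (c : Nat) (x : List (List Int)) :
    (∀ r ∈ x, c < r.length) → List.zipWith (fun r v => r.set c v) x (x.map fun r => r.getD c 0) = x := by
  induction x with
  | nil => intro _; rfl
  | cons r rest ih =>
      intro hc
      have hcr : c < r.length := hc r List.mem_cons_self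
      rw [List.map_cons, List.zipWith_cons_cons, ih (fun r hr => hc r (List.mem_cons_of_mem _ hr))]
      rw [List.getD_eq_getElem r 0 hcr, List.set_getElem_self hcr]

-- writing the rebuilt column back equals A's single two-level set
theorem pvZip_set (c : Nat) (x : List (List Int)) (d : Int) (j : Nat) :
    (∀ r ∈ x, c < r.length) → j < x.length →
    List.zipWith (fun r v => r.set c v) x ((x.map fun r => r.getD c 0).set j d)
      = x.set j ((x.getD j []).set c d) := by
  induction x generalizing j with
  | nil => intro _ hj; simp at hj
  | cons r rest ih =>
      intro hc hj
      cases j with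
      | zero =>
          rw [List.map_cons, List.set_cons_zero, List.zipWith_cons_cons,
            pvZip_id c rest (fun r hr => hc r (List.mem_cons_of_mem _ hr))]
          simp
      | succ j =>
          have hj' : j < rest.length := by simpa using hj
          rw [List.map_cons, List.set_cons_succ, List.zipWith_cons_cons,
            ih j (fun r hr => hc r (List.mem_cons_of_mem _ hr)) hj']
          have hcr : c < r.length := hc r List.mem_cons_self
          rw [List.getD_eq_getElem r 0 hcr, List.set_getElem_self hcr]
          simp

-- the generic edge placement: A's two loops + single set = B's line rebuild,
-- parametrised by the accessor get, the length-n position list, and the writers.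
theorem pvEdge_eq (x : List (List Int)) (d k : Int) (get : Nat → Int) (line : List Int)
    (put : Nat → List (List Int)) (putLine : List Int → List (List Int))
    (hlen : line.length = x.length)
    (hget : ∀ i < x.length, get i = line.getD i 0)
    (hput : ∀ j ∈ pvZs line, ∀ t : Int, 0 ≤ t → t.toNat < (pvZs line).length →
        j = (pvZs line).getD t.toNat 0 → putLine (pvPlaceLine d line t) = put j) :
    (match pvPlaceLoop get (PySem.Int.mod k (pvCountZeros get (List.range x.length)))
        (List.range x.length) (-1) with
     | some j => put j
     | none => x)
    = (if line.count 0 == 0 then x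
       else putLine (pvPlaceLine d line (PySem.Int.mod k ((line.count 0 : Nat) : Int)))) := by
  have hfil : (List.range x.length).filter (fun i => get i == 0) = pvZs line :=
    pvFilter_congr x.length get line hlen hget
  rw [pvCountZeros_eq, pvPlaceLoop_eq, hfil, pvZs_count line]
  rcases Nat.eq_zero_or_pos (pvZs line).length with hz | hz
  · rw [List.eq_nil_of_length_eq_zero hz]
    simp
  · have hpos : (0 : Int) < ((pvZs line).length : Int) := by exact_mod_cast hz
    set tgt := PySem.Int.mod k ((pvZs line).length : Int) with htgt
    have h1 : 0 ≤ tgt := by rw [htgt, PySem.Int.mod_eq_emod_of_pos hpos]; exact Int.emod_nonneg _ (by omega)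
    have h2 : tgt < ((pvZs line).length : Int) := by
      rw [htgt, PySem.Int.mod_eq_emod_of_pos hpos]; exact Int.emod_lt_of_pos _ hpos
    have hlt : (-1 : Int) < tgt := by omega
    have hbound : tgt.toNat < (pvZs line).length := by omega
    have hidx : (tgt - (-1) - 1).toNat = tgt.toNat := by omega
    have hzne : ((pvZs line).length == 0) = false := by simp only [beq_eq_false_iff_ne, ne_eq]; omega
    simp only [hlt, if_true, hidx, hzne, Bool.false_eq_true, if_false]
    rw [List.getElem?_eq_getElem hbound]
    have hmem : (pvZs line)[tgt.toNat] ∈ pvZs line := List.getElem_mem hbound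
    exact (hput _ hmem tgt h1 hbound (List.getD_eq_getElem _ _ hbound).symm).symm

-- branch D/U: the row case of pvEdge_eq, packaged
theorem pvRowBranch (x : List (List Int)) (d k : Int) (ri : Nat)
    (hl : x.length ≤ (x.getD ri []).length) :
    (match pvPlaceLoop (fun i => (x.getD ri []).getD i 0)
        (PySem.Int.mod k (pvCountZeros (fun i => (x.getD ri []).getD i 0) (List.range x.length)))
        (List.range x.length) (-1) with
     | some j => x.set ri ((x.getD ri []).set j d)
     | none => x)
    = (if ((x.getD ri []).take x.length).count 0 == 0 then x
       else x.set ri (pvPlaceLine d ((x.getD ri []).take x.length)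
          (PySem.Int.mod k (((((x.getD ri []).take x.length).count 0 : Nat)) : Int))
          ++ (x.getD ri []).drop x.length)) := by
  have hlen : ((x.getD ri []).take x.length).length = x.length := by
    rw [List.length_take]; omega
  have hget : ∀ i < x.length, (x.getD ri []).getD i 0 = ((x.getD ri []).take x.length).getD i 0 := by
    intro i hi
    rw [List.getD_eq_getElem ((x.getD ri []).take x.length) 0 (by omega),
      List.getElem_take, List.getD_eq_getElem (x.getD ri []) 0 (by omega)]
  have hput : ∀ j ∈ pvZs ((x.getD ri []).take x.length), ∀ t : Int, 0 ≤ t →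
      t.toNat < (pvZs ((x.getD ri []).take x.length)).length →
      j = (pvZs ((x.getD ri []).take x.length)).getD t.toNat 0 →
      x.set ri (pvPlaceLine d ((x.getD ri []).take x.length) t ++ (x.getD ri []).drop x.length)
        = x.set ri ((x.getD ri []).set j d) := by
    intro j hj t ht hb hjeq
    have hjn : j < x.length := by
      have := pvZs_mem_lt _ j hj; omega
    rw [pvPlaceLine_eq_set d _ t ht hb, ← hjeq, pvRow_set (x.getD ri []) d x.length j hjn]
  exact pvEdge_eq x d k (fun i => (x.getD ri []).getD i 0) ((x.getD ri []).take x.length)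
    (fun j => x.set ri ((x.getD ri []).set j d))
    (fun l => x.set ri (l ++ (x.getD ri []).drop x.length)) hlen hget hput

-- branch R/L: the column case of pvEdge_eq, packaged
theorem pvColBranch (x : List (List Int)) (d k : Int) (c : Nat)
    (hc : ∀ r ∈ x, c < r.length) :
    (match pvPlaceLoop (fun i => (x.getD i []).getD c 0)
        (PySem.Int.mod k (pvCountZeros (fun i => (x.getD i []).getD c 0) (List.range x.length)))
        (List.range x.length) (-1) with
     | some j => x.set j ((x.getD j []).set c d)
     | none => x)
    = (if (x.map (fun r => r.getD c 0)).count 0 == 0 then x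
       else List.zipWith (fun r v => r.set c v) x
          (pvPlaceLine d (x.map (fun r => r.getD c 0))
            (PySem.Int.mod k ((((x.map (fun r => r.getD c 0)).count 0 : Nat)) : Int)))) := by
  have hlen : (x.map (fun r => r.getD c 0)).length = x.length := List.length_map ..
  have hget : ∀ i < x.length, (x.getD i []).getD c 0 = (x.map (fun r => r.getD c 0)).getD i 0 := by
    intro i hi
    rw [List.getD_eq_getElem (x.map (fun r => r.getD c 0)) 0 (by omega),
      List.getElem_map, List.getD_eq_getElem x [] hi]
  have hput : ∀ j ∈ pvZs (x.map (fun r => r.getD c 0)), ∀ t : Int, 0 ≤ t →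
      t.toNat < (pvZs (x.map (fun r => r.getD c 0))).length →
      j = (pvZs (x.map (fun r => r.getD c 0))).getD t.toNat 0 →
      List.zipWith (fun r v => r.set c v) x (pvPlaceLine d (x.map (fun r => r.getD c 0)) t)
        = x.set j ((x.getD j []).set c d) := by
    intro j hj t ht hb hjeq
    have hjn : j < x.length := by
      have := pvZs_mem_lt _ j hj; omega
    rw [pvPlaceLine_eq_set d _ t ht hb, ← hjeq, pvZip_set c x d j hc hjn]
  exact pvEdge_eq x d k (fun i => (x.getD i []).getD c 0) (x.map (fun r => r.getD c 0))
    (fun j => x.set j ((x.getD j []).set c d))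
    (fun l => List.zipWith (fun r v => r.set c v) x l) hlen hget hput

-- ===== VERDICT (by name: the statement is the Claim_ definition above) =====
theorem NewNumber_spec : Claim_equal_NewNumber := by
  intro x d k tt _ hpre
  obtain ⟨hD, hU, hR, hL⟩ := hpre
  unfold Spec_NewNumber
  by_cases hx : x = []
  · subst hx
    simp only [NewNumber, NewNumber_alt, List.length_nil, List.range_zero, pvPlaceLoop,
      List.isEmpty_nil, if_true]
    split_ifs <;> rfl
  · have hne : x.isEmpty = false := by simpa [List.isEmpty_iff] using hx
    have hxpos : 0 < x.length := List.length_pos_of_ne_nil hx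
    by_cases h1 : tt = "D"
    · subst h1
      simp only [NewNumber, NewNumber_alt, hne, Bool.false_eq_true, if_false,
        beq_self_eq_true, if_true]
      exact pvRowBranch x d k 0 (hD rfl)
    · have h1' : (tt == "D") = false := by simpa using h1
      by_cases h2 : tt = "U"
      · subst h2
        simp only [NewNumber, NewNumber_alt, hne, Bool.false_eq_true, if_false,
          beq_self_eq_true, if_true]
        exact pvRowBranch x d k (x.length - 1) (hU rfl)
      · have h2' : (tt == "U") = false := by simpa using h2
        by_cases h3 : tt = "R"
        · subst h3
          simp only [NewNumber, NewNumber_alt, hne, Bool.false_eq_true, if_false,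
            beq_self_eq_true, if_true]
          exact pvColBranch x d k 0 (fun r hr => hR rfl r hr)
        · have h3' : (tt == "R") = false := by simpa using h3
          by_cases h4 : tt = "L"
          · subst h4
            simp only [NewNumber, NewNumber_alt, hne, Bool.false_eq_true, if_false,
              beq_self_eq_true, if_true]
            exact pvColBranch x d k (x.length - 1)
              (fun r hr => by have := hL rfl r hr; omega)
          · have h4' : (tt == "L") = false := by simpa using h4
            simp only [NewNumber, NewNumber_alt, hne, h1', h2', h3', h4',
              Bool.false_eq_true, if_false]
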